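-- pv_equiv track=rewrite | github.com/jannikjw/fair-recommender-systems | src/utils.py | create_cluster_user_pairs
-- ===== SOURCE A (Python) =====
-- def create_cluster_user_pairs(user_cluster_ids):
--     inter_cluster_user_pairs = []
--     num_users = len(user_cluster_ids)
--
--     for u_idx in range(num_users):
--         for v_idx in range(num_users):
--             if user_cluster_ids[u_idx] != user_cluster_ids[v_idx]:
--                 inter_cluster_user_pairs.append((u_idx, v_idx))
--
--     intra_cluster_user_pairs = []
--     for u_idx in range(num_users):
--         for v_idx in range(num_users):
--             if user_cluster_ids[u_idx] == user_cluster_ids[v_idx]: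
--                 intra_cluster_user_pairs.append((u_idx, v_idx))
--
--     return inter_cluster_user_pairs, intra_cluster_user_pairs
-- ===== SOURCE B (Python) =====
-- def create_cluster_user_pairs(user_cluster_ids):
--     n = len(user_cluster_ids)
--     # memoize per distinct cluster id the ascending index rows (same-cluster, other-cluster)
--     rows = {}
--     for c in user_cluster_ids:
--         if c not in rows:
--             rows[c] = ([v for v in range(n) if user_cluster_ids[v] == c],
--                        [v for v in range(n) if user_cluster_ids[v] != c])
--     inter_cluster_user_pairs = []
--     intra_cluster_user_pairs = []
--     for u_idx, c in enumerate(user_cluster_ids):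
--         same, diff = rows[c]
--         inter_cluster_user_pairs.extend((u_idx, v) for v in diff)
--         intra_cluster_user_pairs.extend((u_idx, v) for v in same)
--     return inter_cluster_user_pairs, intra_cluster_user_pairs
-- ===== Notes on version B (the rewrite author's own statement) =====
-- stated objective: alternative
-- what changed: B builds a dict memoizing, for each distinct cluster id, its same-cluster and other-cluster index rows, then assembles both pair lists by one dict lookup per user, instead of A's two double loops comparing every ordered pair of users.
import Mathlib
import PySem

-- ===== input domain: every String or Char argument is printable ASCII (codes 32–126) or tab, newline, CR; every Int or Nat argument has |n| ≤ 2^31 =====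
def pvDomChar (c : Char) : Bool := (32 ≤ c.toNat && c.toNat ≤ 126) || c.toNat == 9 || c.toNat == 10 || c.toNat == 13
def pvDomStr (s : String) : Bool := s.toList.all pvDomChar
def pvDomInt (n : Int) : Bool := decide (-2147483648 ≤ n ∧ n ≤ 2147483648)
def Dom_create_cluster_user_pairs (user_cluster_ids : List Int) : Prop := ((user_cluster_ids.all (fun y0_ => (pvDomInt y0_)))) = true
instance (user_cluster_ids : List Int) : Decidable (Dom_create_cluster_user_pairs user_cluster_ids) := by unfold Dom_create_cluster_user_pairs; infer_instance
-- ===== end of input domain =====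

-- B memoizes, per distinct cluster id, its same/other index rows in a dict built once and
-- assembles both pair lists by lookup, instead of A's two pairwise-comparing double loops
-- (objective: alternative).

-- ===== PORT A =====
-- two separate double loops over range(num_users), indexing user_cluster_ids (indices always in range, so pyGetD's default is never used)
def create_cluster_user_pairs (user_cluster_ids : List Int) : (List (Int × Int)) × (List (Int × Int)) :=
  let num_users : Int := PySem.List.len user_cluster_ids
  let inter :=
    (PySem.List.pyRange 0 num_users).foldl (fun acc u_idx =>
      (PySem.List.pyRange 0 num_users).foldl (fun acc v_idx =>
        if PySem.List.pyGetD user_cluster_ids u_idx 0 ≠ PySem.List.pyGetD user_cluster_ids v_idx 0 then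
          acc ++ [(u_idx, v_idx)]
        else acc) acc) []
  let intra :=
    (PySem.List.pyRange 0 num_users).foldl (fun acc u_idx =>
      (PySem.List.pyRange 0 num_users).foldl (fun acc v_idx =>
        if PySem.List.pyGetD user_cluster_ids u_idx 0 = PySem.List.pyGetD user_cluster_ids v_idx 0 then
          acc ++ [(u_idx, v_idx)]
        else acc) acc) []
  (inter, intra)

-- ===== PORT B =====
-- rows[c] = ([v for v in range(n) if ids[v] == c], [v for v in range(n) if ids[v] != c])
def ccup_row (user_cluster_ids : List Int) (c : Int) : List Int × List Int :=
  ((PySem.List.pyRange 0 (PySem.List.len user_cluster_ids)).filter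
      (fun v => PySem.List.pyGetD user_cluster_ids v 0 == c),
   (PySem.List.pyRange 0 (PySem.List.len user_cluster_ids)).filter
      (fun v => PySem.List.pyGetD user_cluster_ids v 0 != c))

-- the memo dict: one entry per distinct cluster id, built on first sight
def ccup_rows (user_cluster_ids : List Int) : PySem.Dict Int (List Int × List Int) :=
  user_cluster_ids.foldl
    (fun d c => if d.contains c then d else d.insert c (ccup_row user_cluster_ids c))
    PySem.Dict.empty

-- main loop: one lookup per user, extend both result lists with the mapped rows
def create_cluster_user_pairs_alt (user_cluster_ids : List Int) : (List (Int × Int)) × (List (Int × Int)) :=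
  let rows := ccup_rows user_cluster_ids
  (PySem.List.enumerate user_cluster_ids).foldl
    (fun st p =>
      let r := rows.getD p.2 ([], [])
      (st.1 ++ r.2.map (fun v => (p.1, v)), st.2 ++ r.1.map (fun v => (p.1, v))))
    ([], [])

-- ===== PRECONDITION & SPEC =====
def Spec_create_cluster_user_pairs (user_cluster_ids : List Int) (out : (List (Int × Int)) × (List (Int × Int))) : Prop := out = create_cluster_user_pairs_alt user_cluster_ids
instance (user_cluster_ids : List Int) (out : (List (Int × Int)) × (List (Int × Int))) : Decidable (Spec_create_cluster_user_pairs user_cluster_ids out) := by unfold Spec_create_cluster_user_pairs; infer_instance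

-- ===== CLAIM (what is proved, stated in full; the proofs are below) =====
def Claim_equal_create_cluster_user_pairs : Prop := ∀ (user_cluster_ids : List Int), Dom_create_cluster_user_pairs user_cluster_ids → Spec_create_cluster_user_pairs user_cluster_ids (create_cluster_user_pairs user_cluster_ids)

-- ===== LEMMAS AND PROOFS =====

-- every value stored in the memo fold is the memoized row of its key
theorem ccup_rows_get?_inv (xs : List Int) :
    ∀ (ys : List Int) (d : PySem.Dict Int (List Int × List Int)),
      (∀ c v, d.get? c = some v → v = ccup_row xs c) →
      ∀ c v,
        (ys.foldl (fun d c => if d.contains c then d else d.insert c (ccup_row xs c)) d).get? c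
          = some v → v = ccup_row xs c := by
  intro ys
  induction ys with
  | nil => intro d h c v hv; exact h c v hv
  | cons y t ih =>
    intro d h c v
    simp only [List.foldl_cons]
    apply ih
    intro c' v' hv'
    by_cases hc : d.contains y = true
    · rw [if_pos hc] at hv'; exact h c' v' hv'
    · rw [if_neg hc, PySem.Dict.get?_insert] at hv'
      by_cases he : c' = y
      · rw [if_pos he] at hv'
        subst he
        exact (Option.some.inj hv').symm
      · rw [if_neg he] at hv'
        exact h c' v' hv'

-- membership in the dict is monotone through the memo fold
theorem ccup_rows_contains_mono (xs : List Int) :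
    ∀ (ys : List Int) (d : PySem.Dict Int (List Int × List Int)) (c : Int),
      d.contains c = true →
      (ys.foldl (fun d c => if d.contains c then d else d.insert c (ccup_row xs c)) d).contains c
        = true := by
  intro ys
  induction ys with
  | nil => intro d c h; exact h
  | cons y t ih =>
    intro d c h
    simp only [List.foldl_cons]
    apply ih
    by_cases hc : d.contains y = true
    · rwa [if_pos hc]
    · rw [if_neg hc]
      simp [PySem.Dict.contains_insert, h]

-- every cluster id seen by the memo fold ends up in the dict
theorem ccup_rows_contains (xs : List Int) :
    ∀ (ys : List Int) (d : PySem.Dict Int (List Int × List Int)) (c : Int), c ∈ ys →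
      (ys.foldl (fun d c => if d.contains c then d else d.insert c (ccup_row xs c)) d).contains c
        = true := by
  intro ys
  induction ys with
  | nil => intro d c h; cases h
  | cons y t ih =>
    intro d c h
    simp only [List.foldl_cons]
    rcases List.mem_cons.mp h with h | h
    · subst h
      apply ccup_rows_contains_mono
      by_cases hc : d.contains c = true
      · rwa [if_pos hc]
      · rw [if_neg hc]
        exact PySem.Dict.contains_insert_self d c _
    · exact ih _ c h

-- lookup of any cluster id occurring in the input returns its memoized row
theorem ccup_rows_getD (xs : List Int) (c : Int) (h : c ∈ xs) :
    (ccup_rows xs).getD c ([], []) = ccup_row xs c := by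
  have hcont : (ccup_rows xs).contains c = true := ccup_rows_contains xs xs PySem.Dict.empty c h
  rw [PySem.Dict.contains_eq_isSome_get?] at hcont
  rcases Option.isSome_iff_exists.mp hcont with ⟨v, hv⟩
  have hval : v = ccup_row xs c := by
    refine ccup_rows_get?_inv xs xs PySem.Dict.empty ?_ c v hv
    intro c' v' hv'
    simp [PySem.Dict.get?_empty] at hv'
  rw [PySem.Dict.getD_of_get?_eq_some _ _ hv, hval]

-- an index drawn from range(len xs) reads an element of xs
theorem pyGetD_mem_of_mem_pyRange (xs : List Int) (j : Int)
    (hj : j ∈ PySem.List.pyRange 0 (PySem.List.len xs)) :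
    PySem.List.pyGetD xs j 0 ∈ xs := by
  rw [PySem.List.mem_pyRange_one] at hj
  have hlen : PySem.List.len xs = (xs.length : Int) := by simp [PySem.List.len]
  rw [hlen] at hj
  have hlt : j < (xs.length : Int) := hj.2
  rw [PySem.List.pyGetD_eq_getElem xs 0 hj.1 hlt]
  exact List.getElem_mem _

-- the two programs agree
theorem create_cluster_user_pairs_eq (xs : List Int) :
    create_cluster_user_pairs xs = create_cluster_user_pairs_alt xs := by
  have hinter :
      (PySem.List.pyRange 0 (PySem.List.len xs)).foldl (fun acc u_idx =>
        (PySem.List.pyRange 0 (PySem.List.len xs)).foldl (fun acc v_idx =>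
          if PySem.List.pyGetD xs u_idx 0 ≠ PySem.List.pyGetD xs v_idx 0 then
            acc ++ [(u_idx, v_idx)]
          else acc) acc) []
      = (PySem.List.pyRange 0 (PySem.List.len xs)).foldl
          (fun acc u => acc ++ (ccup_row xs (PySem.List.pyGetD xs u 0)).2.map (fun v => (u, v)))
          [] := by
    apply PySem.List.foldl_congr_mem
    intro acc u _
    have hb : (fun (acc : List (Int × Int)) v_idx =>
        if PySem.List.pyGetD xs u 0 ≠ PySem.List.pyGetD xs v_idx 0 then acc ++ [(u, v_idx)] else acc)
        = (fun acc v_idx =>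
          if (PySem.List.pyGetD xs v_idx 0 != PySem.List.pyGetD xs u 0) = true then
            acc ++ [(u, v_idx)]
          else acc) := by
      funext acc v
      by_cases h : PySem.List.pyGetD xs u 0 = PySem.List.pyGetD xs v 0
      · simp [h]
      · have h2 : ¬ PySem.List.pyGetD xs v 0 = PySem.List.pyGetD xs u 0 := fun h' => h h'.symm
        simp [h, h2]
    rw [hb, PySem.List.foldl_append_if]
    rfl
  have hintra :
      (PySem.List.pyRange 0 (PySem.List.len xs)).foldl (fun acc u_idx =>
        (PySem.List.pyRange 0 (PySem.List.len xs)).foldl (fun acc v_idx =>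
          if PySem.List.pyGetD xs u_idx 0 = PySem.List.pyGetD xs v_idx 0 then
            acc ++ [(u_idx, v_idx)]
          else acc) acc) []
      = (PySem.List.pyRange 0 (PySem.List.len xs)).foldl
          (fun acc u => acc ++ (ccup_row xs (PySem.List.pyGetD xs u 0)).1.map (fun v => (u, v)))
          [] := by
    apply PySem.List.foldl_congr_mem
    intro acc u _
    have hb : (fun (acc : List (Int × Int)) v_idx =>
        if PySem.List.pyGetD xs u 0 = PySem.List.pyGetD xs v_idx 0 then acc ++ [(u, v_idx)] else acc)
        = (fun acc v_idx =>
          if (PySem.List.pyGetD xs v_idx 0 == PySem.List.pyGetD xs u 0) = true then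
            acc ++ [(u, v_idx)]
          else acc) := by
      funext acc v
      by_cases h : PySem.List.pyGetD xs u 0 = PySem.List.pyGetD xs v 0
      · simp [h]
      · have h2 : ¬ PySem.List.pyGetD xs v 0 = PySem.List.pyGetD xs u 0 := fun h' => h h'.symm
        simp [h, h2]
    rw [hb, PySem.List.foldl_append_if]
    rfl
  have hB : create_cluster_user_pairs_alt xs
      = ((PySem.List.pyRange 0 (PySem.List.len xs)).foldl
           (fun acc u => acc ++ (ccup_row xs (PySem.List.pyGetD xs u 0)).2.map (fun v => (u, v))) [],
         (PySem.List.pyRange 0 (PySem.List.len xs)).foldl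
           (fun acc u => acc ++ (ccup_row xs (PySem.List.pyGetD xs u 0)).1.map (fun v => (u, v))) []) := by
    unfold create_cluster_user_pairs_alt
    rw [PySem.List.enumerate_eq_map_pyRange xs 0, List.foldl_map]
    rw [PySem.List.foldl_congr_mem _ _
        (fun (st : List (Int × Int) × List (Int × Int)) j =>
          (st.1 ++ (ccup_row xs (PySem.List.pyGetD xs j 0)).2.map (fun v => (j, v)),
           st.2 ++ (ccup_row xs (PySem.List.pyGetD xs j 0)).1.map (fun v => (j, v))))
        ([], [])
        (by
          intro st j hj
          dsimp only
          rw [ccup_rows_getD xs _ (pyGetD_mem_of_mem_pyRange xs j hj)])]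
    exact PySem.List.foldl_prod_mk
      (fun acc u => acc ++ (ccup_row xs (PySem.List.pyGetD xs u 0)).2.map (fun v => (u, v)))
      (fun acc u => acc ++ (ccup_row xs (PySem.List.pyGetD xs u 0)).1.map (fun v => (u, v)))
      (PySem.List.pyRange 0 (PySem.List.len xs)) [] []
  rw [hB, ← hinter, ← hintra]
  rfl

-- ===== VERDICT (by name: the statement is the Claim_ definition above) =====
theorem create_cluster_user_pairs_spec : Claim_equal_create_cluster_user_pairs := by
  intro xs _
  exact create_cluster_user_pairs_eq xs
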